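-- pv_equiv track=rewrite | github.com/FilippoHoch/patch-gui | patch_gui/filetypes.py | _infer_from_sample
-- ===== SOURCE A (Python) =====
-- def _infer_from_sample(sample: list[str]) -> str:
--     if not sample:
--         return "text"
--
--     joined = "\n".join(sample)
--     first = sample[0]
--
--     if first.startswith("{") or first.startswith("["):
--         return "json"
--     if first.startswith("<?xml") or first.startswith("<"):
--         return "xml"
--     if any(line.startswith("---") and ":" in line for line in sample):
--         return "yaml"
--     if any(line.startswith("#include") for line in sample):
--         return "c"
--     if any(line.startswith("def ") or line.startswith("class ") for line in sample):
--         return "python"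
--     if any(
--         line.startswith("function ") or line.startswith("const ") for line in sample
--     ):
--         return "javascript"
--     if any(
--         line.startswith("SELECT ") or line.startswith("CREATE TABLE") for line in sample
--     ):
--         return "sql"
--
--     if joined.count("=") >= 2 and all("=" in line for line in sample[:5]):
--         return "ini"
--     if any(line.startswith("#!/") for line in sample):
--         return "shell"
--
--     return "text"
-- ===== SOURCE B (Python) =====
-- def _infer_from_sample(sample: list[str]) -> str:
--     # One pass builds a flag table (plus an '=' total and a first-five-lines
--     # '=' check); the priority chain is then evaluated once on the flags.
--     if not sample:
--         return "text"
--
--     first = sample[0]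
--     if first.startswith("{") or first.startswith("["):
--         return "json"
--     if first.startswith("<"):
--         return "xml"
--
--     yaml = c = py = js = sql = shell = False
--     eq_head = True
--     eq_total = 0
--     for i, line in enumerate(sample):
--         if line.startswith("---") and ":" in line:
--             yaml = True
--         if line.startswith("#include"):
--             c = True
--         if line.startswith("def ") or line.startswith("class "):
--             py = True
--         if line.startswith("function ") or line.startswith("const "):
--             js = True
--         if line.startswith("SELECT ") or line.startswith("CREATE TABLE"):
--             sql = True
--         if line.startswith("#!/"):
--             shell = True
--         if i < 5 and "=" not in line:
--             eq_head = False
--         eq_total += line.count("=")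
--
--     if yaml:
--         return "yaml"
--     if c:
--         return "c"
--     if py:
--         return "python"
--     if js:
--         return "javascript"
--     if sql:
--         return "sql"
--     if eq_total >= 2 and eq_head:
--         return "ini"
--     if shell:
--         return "shell"
--     return "text"
-- ===== Notes on version B (the rewrite author's own statement) =====
-- stated objective: alternative
-- what changed: Replaces A's six separate any()/all() scans and the join-then-count pass by a single loop over sample that accumulates boolean flags, a per-line '=' total and the first-five-lines '=' check, followed by one evaluation of the same priority chain over the flag table.
import Mathlib
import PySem

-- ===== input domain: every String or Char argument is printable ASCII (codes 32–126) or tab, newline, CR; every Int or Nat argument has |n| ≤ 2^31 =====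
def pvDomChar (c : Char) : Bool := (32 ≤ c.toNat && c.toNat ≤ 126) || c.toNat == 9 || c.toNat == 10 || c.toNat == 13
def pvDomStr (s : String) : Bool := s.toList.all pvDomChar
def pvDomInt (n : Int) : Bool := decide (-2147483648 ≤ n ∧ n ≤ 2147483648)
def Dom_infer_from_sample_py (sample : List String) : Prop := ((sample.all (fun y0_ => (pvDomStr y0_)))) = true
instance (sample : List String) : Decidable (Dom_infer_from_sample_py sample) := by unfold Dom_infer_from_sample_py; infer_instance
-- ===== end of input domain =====

-- B merges A's six separate any()/all() scans into one flag-accumulating pass;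
-- same return value everywhere ("alternative" objective, no speed claim).

-- ===== PORT A =====
def infer_from_sample_py (sample : List String) : String :=
  if sample.isEmpty then "text"
  else
    let joined := PySem.Str.join "\n" sample
    let first := sample.headI
    if PySem.Str.startswith first "{" || PySem.Str.startswith first "[" then "json"
    else if PySem.Str.startswith first "<?xml" || PySem.Str.startswith first "<" then "xml"
    else if sample.any (fun line => PySem.Str.startswith line "---" && PySem.Str.isIn ":" line) then "yaml"
    else if sample.any (fun line => PySem.Str.startswith line "#include") then "c"
    else if sample.any (fun line => PySem.Str.startswith line "def " || PySem.Str.startswith line "class ") then "python"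
    else if sample.any (fun line => PySem.Str.startswith line "function " || PySem.Str.startswith line "const ") then "javascript"
    else if sample.any (fun line => PySem.Str.startswith line "SELECT " || PySem.Str.startswith line "CREATE TABLE") then "sql"
    else if 2 ≤ PySem.Str.count joined "=" ∧
              (PySem.List.slice sample none (some 5)).all (fun line => PySem.Str.isIn "=" line) = true then "ini"
    else if sample.any (fun line => PySem.Str.startswith line "#!/") then "shell"
    else "text"

-- ===== PORT B =====
structure BSt where
  yaml : Bool
  c : Bool
  py : Bool
  js : Bool
  sql : Bool
  shell : Bool
  eqHead : Bool
  eqTotal : Nat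
deriving DecidableEq, Repr

def bStep (st : BSt) (p : Int × String) : BSt :=
  let line := p.2
  { yaml := st.yaml || (PySem.Str.startswith line "---" && PySem.Str.isIn ":" line),
    c := st.c || PySem.Str.startswith line "#include",
    py := st.py || (PySem.Str.startswith line "def " || PySem.Str.startswith line "class "),
    js := st.js || (PySem.Str.startswith line "function " || PySem.Str.startswith line "const "),
    sql := st.sql || (PySem.Str.startswith line "SELECT " || PySem.Str.startswith line "CREATE TABLE"),
    shell := st.shell || PySem.Str.startswith line "#!/",
    eqHead := if p.1 < 5 ∧ PySem.Str.isIn "=" line = false then false else st.eqHead,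
    eqTotal := st.eqTotal + PySem.Str.count line "=" }

def infer_from_sample_py_alt (sample : List String) : String :=
  match sample with
  | [] => "text"
  | first :: _ =>
    if PySem.Str.startswith first "{" || PySem.Str.startswith first "[" then "json"
    else if PySem.Str.startswith first "<" then "xml"
    else
      let st := (PySem.List.enumerate sample).foldl bStep ⟨false, false, false, false, false, false, true, 0⟩
      if st.yaml then "yaml"
      else if st.c then "c"
      else if st.py then "python"
      else if st.js then "javascript"
      else if st.sql then "sql"
      else if 2 ≤ st.eqTotal ∧ st.eqHead = true then "ini"
      else if st.shell then "shell"
      else "text"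

-- ===== PRECONDITION & SPEC =====
def Spec_infer_from_sample_py (sample : List String) (out : String) : Prop := out = infer_from_sample_py_alt sample
instance (sample : List String) (out : String) : Decidable (Spec_infer_from_sample_py sample out) := by unfold Spec_infer_from_sample_py; infer_instance

-- ===== CLAIM (what is proved, stated in full; the proofs are below) =====
def Claim_equal_infer_from_sample_py : Prop := ∀ (sample : List String), Dom_infer_from_sample_py sample → Spec_infer_from_sample_py sample (infer_from_sample_py sample)

-- ===== LEMMAS AND PROOFS =====

lemma count_go_singleton (c : Char) : ∀ (cs : List Char) (fuel acc : Nat), cs.length ≤ fuel →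
    PySem.Chars.count.go [c] fuel cs acc = acc + cs.count c := by
  intro cs
  induction cs with
  | nil => intro fuel acc _; cases fuel <;> simp [PySem.Chars.count.go]
  | cons h t ih =>
    intro fuel acc hle
    cases fuel with
    | zero => simp at hle
    | succ f =>
      have hpre : [c].isPrefixOf (h :: t) = (c == h) := by simp [List.isPrefixOf]
      simp only [PySem.Chars.count.go, hpre, List.count_cons]
      by_cases hc : c = h
      · subst hc
        simp only [beq_self_eq_true, if_true, List.length_cons, List.length_nil,
          List.drop_succ_cons, List.drop_zero]
        rw [ih f (acc + 1) (by simpa using hle)]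
        omega
      · have hbeq : (c == h) = false := by simp [hc]
        have hbeq' : (h == c) = false := by simp [Ne.symm hc]
        simp only [hbeq, hbeq']
        rw [ih f acc (by simpa using hle)]
        simp

lemma count_char (cs : List Char) (c : Char) : PySem.Chars.count cs [c] = cs.count c := by
  have h := count_go_singleton c cs cs.length 0 le_rfl
  simp [PySem.Chars.count, h]

lemma count_intercalate (c sep : Char) (hc : c ≠ sep) :
    ∀ l : List (List Char), (List.intercalate [sep] l).count c = (l.map (fun cs => cs.count c)).sum := by
  intro l
  induction l with
  | nil => simp [List.intercalate]
  | cons x t ih =>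
    cases t with
    | nil => simp [List.intercalate, List.intersperse, List.flatten]
    | cons y t' =>
      have hcc : List.intercalate [sep] (x :: y :: t') = x ++ [sep] ++ List.intercalate [sep] (y :: t') := by
        simp [List.intercalate, List.intersperse]
      rw [hcc]
      simp only [List.count_append, List.map_cons, List.sum_cons]
      rw [ih]
      have : List.count c [sep] = 0 := by simp [Ne.symm hc]
      simp [this]

lemma join_count_eq (l : List String) :
    PySem.Str.count (PySem.Str.join "\n" l) "=" = (l.map (fun s => PySem.Str.count s "=")).sum := by
  simp only [PySem.Str.count, PySem.Str.join, PySem.Chars.join]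
  have h1 : (String.ofList (List.intercalate "\n".toList (l.map String.toList))).toList
      = List.intercalate "\n".toList (l.map String.toList) := by simp
  rw [h1]
  have h2 : "\n".toList = ['\n'] := by decide
  have h3 : "=".toList = ['='] := by decide
  rw [h2, h3, count_char, count_intercalate '=' '\n' (by decide)]
  rw [List.map_map]
  congr 1
  apply List.map_congr_left
  intro s _
  simp [Function.comp, ← count_char]

lemma xml_absorb (s : String) :
    (PySem.Str.startswith s "<?xml" || PySem.Str.startswith s "<") = PySem.Str.startswith s "<" := by
  cases h : PySem.Str.startswith s "<?xml" with
  | false => simp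
  | true =>
    have h5 : "<?xml".toList <+: s.toList :=
      (PySem.Chars.startswith_iff s.toList "<?xml".toList).mp (by simpa using h)
    have h1 : "<".toList <+: s.toList := List.IsPrefix.trans (by decide) h5
    have hlt : ("<".toList) = ['<'] := by decide
    rw [hlt] at h1
    have hsw : PySem.Str.startswith s "<" = true := by
      simp only [PySem.Str.startswith_eq]
      rw [show ("<".toList) = ['<'] from by decide]
      exact (PySem.Chars.startswith_iff _ _).mpr h1
    cases hg : PySem.Str.startswith s "<" with
    | true => simp
    | false => rw [hg] at hsw; exact absurd hsw (by simp)

lemma bfold_spec : ∀ (l : List String) (k : Nat) (st : BSt),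
    (PySem.List.enumerate l (k : Int)).foldl bStep st =
      ⟨st.yaml || l.any (fun line => PySem.Str.startswith line "---" && PySem.Str.isIn ":" line),
       st.c || l.any (fun line => PySem.Str.startswith line "#include"),
       st.py || l.any (fun line => PySem.Str.startswith line "def " || PySem.Str.startswith line "class "),
       st.js || l.any (fun line => PySem.Str.startswith line "function " || PySem.Str.startswith line "const "),
       st.sql || l.any (fun line => PySem.Str.startswith line "SELECT " || PySem.Str.startswith line "CREATE TABLE"),
       st.shell || l.any (fun line => PySem.Str.startswith line "#!/"),
       st.eqHead && (l.take (5 - k)).all (fun line => PySem.Str.isIn "=" line),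
       st.eqTotal + (l.map (fun s => PySem.Str.count s "=")).sum⟩ := by
  intro l
  induction l with
  | nil => intro k st; simp [PySem.List.enumerate]
  | cons x t ih =>
    intro k st
    have hen : PySem.List.enumerate (x :: t) (k : Int) = ((k : Int), x) :: PySem.List.enumerate t ((k : Int) + 1) := by
      simp [PySem.List.enumerate]
    have hcast : ((k : Int) + 1) = ((k + 1 : Nat) : Int) := by push_cast; ring
    rw [hen, List.foldl_cons, hcast, ih (k + 1)]
    by_cases hk : k < 5
    · have htake : (x :: t).take (5 - k) = x :: t.take (4 - k) := by
        have h54 : 5 - k = (4 - k) + 1 := by omega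
        rw [h54, List.take_succ_cons]
      have hki : ((k : Int) < 5) := by exact_mod_cast hk
      simp [bStep, htake, hki, Bool.or_assoc, Bool.and_assoc, Bool.and_left_comm, Nat.add_assoc]
    · have htake1 : (x :: t).take (5 - k) = [] := by
        have : 5 - k = 0 := by omega
        simp [this]
      have htake2 : t.take (4 - k) = [] := by
        have : 4 - k = 0 := by omega
        simp [this]
      have hki : ¬ ((k : Int) < 5) := by exact_mod_cast hk
      simp [bStep, htake1, htake2, hki, Bool.or_assoc, Nat.add_assoc]

-- ===== VERDICT (by name: the statement is the Claim_ definition above) =====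
theorem infer_from_sample_py_spec : Claim_equal_infer_from_sample_py := by
  intro sample _
  unfold Spec_infer_from_sample_py infer_from_sample_py infer_from_sample_py_alt
  cases sample with
  | nil => simp
  | cons x t =>
    have hfold : (PySem.List.enumerate (x :: t) 0).foldl bStep
        ⟨false, false, false, false, false, false, true, 0⟩ =
        ⟨(x :: t).any (fun line => PySem.Str.startswith line "---" && PySem.Str.isIn ":" line),
         (x :: t).any (fun line => PySem.Str.startswith line "#include"),
         (x :: t).any (fun line => PySem.Str.startswith line "def " || PySem.Str.startswith line "class "),
         (x :: t).any (fun line => PySem.Str.startswith line "function " || PySem.Str.startswith line "const "),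
         (x :: t).any (fun line => PySem.Str.startswith line "SELECT " || PySem.Str.startswith line "CREATE TABLE"),
         (x :: t).any (fun line => PySem.Str.startswith line "#!/"),
         ((x :: t).take 5).all (fun line => PySem.Str.isIn "=" line),
         ((x :: t).map (fun s => PySem.Str.count s "=")).sum⟩ := by
      have h := bfold_spec (x :: t) 0 ⟨false, false, false, false, false, false, true, 0⟩
      simpa using h
    have hslice : PySem.List.slice (x :: t) none (some 5) = (x :: t).take 5 := by
      have h := PySem.List.slice_to (x :: t) (b := 5) (by omega)
      simpa using h
    simp only [List.isEmpty_cons, Bool.false_eq_true, if_false, List.headI]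
    simp only [xml_absorb, join_count_eq, hslice, hfold]
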